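-- pv_equiv track=rewrite | github.com/infval/AMLUnpacker_TrueRemembrance | AMLUnpacker_Python/etc1decoder.py | etc1Scramble
-- ===== SOURCE A (Python) =====
-- def etc1Scramble(width, height):
--     tileScramble = [0] * ((width // 4) * (height // 4))
--     baseAccumulator = 0
--     rowAccumulator = 0
--     baseNumber = 0
--     rowNumber = 0
--
--     for tile in range(len(tileScramble)):
--         if (tile % (width // 4) == 0) and tile > 0:
--             if rowAccumulator < 1:
--                 rowAccumulator += 1
--                 rowNumber += 2
--                 baseNumber = rowNumber
--             else:
--                 rowAccumulator = 0
--                 baseNumber -= 2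
--                 rowNumber = baseNumber
--
--         tileScramble[tile] = baseNumber
--
--         if baseAccumulator < 1:
--             baseAccumulator += 1
--             baseNumber += 1
--         else:
--             baseAccumulator = 0
--             baseNumber += 3
--
--     return tileScramble
-- ===== SOURCE B (Python) =====
-- def etc1Scramble(width, height):
--     W = width // 4
--     H = height // 4
--     if W <= 0 or H <= 0:
--         return []
--     out = []
--     base = 0
--     for r in range(H):
--         if r > 0:
--             base += 2 if r % 2 == 1 else 2 * W + W % 2 - 2
--         if r % 2 == 1 and W % 2 == 1:
--             out.extend(base + 2 * j + j % 2 for j in range(W))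
--         else:
--             out.extend(base + 2 * j - j % 2 for j in range(W))
--     return out
-- ===== Notes on version B (the rewrite author's own statement) =====
-- stated objective: alternative
-- what changed: Replaces the single flat tile loop with two toggling accumulators and an inline row-boundary test by an explicit per-row base recurrence plus a closed-form per-column fill (base + 2*j ± j%2).
-- intended difference: For width<0 and height<0 A returns a nonempty scramble table of (width//4)*(height//4) entries (an artefact of Python floor division and the product of two negatives), while B returns [], the intended empty table for non-positive dimensions. — e.g. on etc1Scramble(-1, -1): A returns [0], B returns []
import Mathlib
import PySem

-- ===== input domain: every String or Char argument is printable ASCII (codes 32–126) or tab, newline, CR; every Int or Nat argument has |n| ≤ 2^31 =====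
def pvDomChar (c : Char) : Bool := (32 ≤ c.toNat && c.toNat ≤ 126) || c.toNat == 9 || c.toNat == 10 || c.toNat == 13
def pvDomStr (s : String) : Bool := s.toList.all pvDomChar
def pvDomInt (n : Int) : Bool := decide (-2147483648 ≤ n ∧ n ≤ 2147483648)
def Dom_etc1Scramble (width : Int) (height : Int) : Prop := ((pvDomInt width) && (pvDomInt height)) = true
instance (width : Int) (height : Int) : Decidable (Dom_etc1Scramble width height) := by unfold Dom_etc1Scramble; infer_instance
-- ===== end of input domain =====

-- B replaces A's flat tile loop (two toggling accumulators, inline row-boundary test) by a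
-- per-row base recurrence plus a closed-form column fill; equivalence of RETURN values is
-- proved outside D_ (width<0 ∧ height<0), where A's nonempty table is a floor-division artefact.

-- ===== PORT A =====
-- state: (baseAccumulator, rowAccumulator, baseNumber, rowNumber, tileScramble-so-far);
-- the sequential index assignment tileScramble[tile] = baseNumber is ported as an append.
def etc1Loop (W : Int) : List Int → Int × Int × Int × Int × List Int → Int × Int × Int × Int × List Int
  | [], s => s
  | tile :: rest, (ba, ra, bn, rn, acc) =>
    let s1 : Int × Int × Int :=
      if PySem.Int.mod tile W = 0 ∧ 0 < tile then
        if ra < 1 then (ra + 1, rn + 2, rn + 2)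
        else (0, bn - 2, bn - 2)
      else (ra, bn, rn)
    let acc' := acc ++ [s1.2.1]
    if ba < 1 then etc1Loop W rest (ba + 1, s1.1, s1.2.1 + 1, s1.2.2, acc')
    else etc1Loop W rest (0, s1.1, s1.2.1 + 3, s1.2.2, acc')

def etc1Scramble (width : Int) (height : Int) : List Int :=
  let W := PySem.Int.floordiv width 4
  let n := W * PySem.Int.floordiv height 4
  (etc1Loop W (PySem.List.pyRange 0 n 1) (0, 0, 0, 0, [])).2.2.2.2

-- ===== PORT B =====
def etc1Scramble_alt (width : Int) (height : Int) : List Int :=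
  let W := PySem.Int.floordiv width 4
  let H := PySem.Int.floordiv height 4
  if W ≤ 0 ∨ H ≤ 0 then []
  else
    ((List.range H.toNat).foldl
      (fun (st : Int × List Int) (r : Nat) =>
        let base :=
          if 0 < r then
            (if r % 2 = 1 then st.1 + 2 else st.1 + 2 * W + PySem.Int.mod W 2 - 2)
          else st.1
        let row := (List.range W.toNat).map (fun (j : Nat) =>
          if r % 2 = 1 ∧ PySem.Int.mod W 2 = 1 then base + 2 * (j : Int) + PySem.Int.mod (j : Int) 2
          else base + 2 * (j : Int) - PySem.Int.mod (j : Int) 2)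
        (base, st.2 ++ row))
      ((0 : Int), ([] : List Int))).2

-- ===== PRECONDITION & SPEC =====
-- For width<0 and height<0 A returns a nonempty scramble table of (width//4)*(height//4) entries
-- (an artefact of Python floor division and the product of two negatives), while B returns [],
-- the intended empty table for non-positive dimensions.
def D_etc1Scramble (width : Int) (height : Int) : Prop := width < 0 ∧ height < 0
instance (width : Int) (height : Int) : Decidable (D_etc1Scramble width height) := by unfold D_etc1Scramble; infer_instance
def Spec_etc1Scramble (width : Int) (height : Int) (out : List Int) : Prop := ¬ D_etc1Scramble width height → out = etc1Scramble_alt width height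
instance (width : Int) (height : Int) (out : List Int) : Decidable (Spec_etc1Scramble width height out) := by unfold Spec_etc1Scramble; infer_instance
def pvDiffWitness_etc1Scramble : Int × Int := (-1, -1)
def pvDiffWitnessOut_etc1Scramble : (List Int) × (List Int) := ([0], [])

-- ===== CLAIM (what is proved, stated in full; the proofs are below) =====
def Claim_unchanged_etc1Scramble : Prop := ∀ (width : Int) (height : Int), Dom_etc1Scramble width height → Spec_etc1Scramble width height (etc1Scramble width height)
def Claim_changed_etc1Scramble : Prop := Dom_etc1Scramble (pvDiffWitness_etc1Scramble.1) (pvDiffWitness_etc1Scramble.2) ∧ D_etc1Scramble (pvDiffWitness_etc1Scramble.1) (pvDiffWitness_etc1Scramble.2) ∧ etc1Scramble (pvDiffWitness_etc1Scramble.1) (pvDiffWitness_etc1Scramble.2) = pvDiffWitnessOut_etc1Scramble.1 ∧ etc1Scramble_alt (pvDiffWitness_etc1Scramble.1) (pvDiffWitness_etc1Scramble.2) = pvDiffWitnessOut_etc1Scramble.2 ∧ pvDiffWitnessOut_etc1Scramble.1 ≠ pvDiffWitnessOut_etc1Scramble.2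
def Claim_exact_etc1Scramble : Prop := ∀ (width : Int) (height : Int), Dom_etc1Scramble width height → D_etc1Scramble width height → etc1Scramble width height ≠ etc1Scramble_alt width height

-- ===== LEMMAS AND PROOFS =====

-- closed-form column offset: sum of the first j alternating increments starting at tile t0
def pvOff (t0 j : Nat) : Int :=
  if t0 % 2 = 0 then 2 * (j : Int) - ((j % 2 : Nat) : Int) else 2 * (j : Int) + ((j % 2 : Nat) : Int)

-- row-base recurrence (Wn = width//4 > 0)
def pvBase (Wn : Nat) : Nat → Int
  | 0 => 0
  | r + 1 => if (r + 1) % 2 = 1 then pvBase Wn r + 2 else pvBase Wn r + 2 * (Wn : Int) + ((Wn % 2 : Nat) : Int) - 2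

def pvOut (Wn r : Nat) : List Int :=
  (List.range r).flatMap (fun k => (List.range Wn).map (fun j => pvBase Wn k + pvOff (k * Wn) j))

lemma etc1Loop_append (W : Int) (l1 l2 : List Int) (s : Int × Int × Int × Int × List Int) :
    etc1Loop W (l1 ++ l2) s = etc1Loop W l2 (etc1Loop W l1 s) := by
  induction l1 generalizing s with
  | nil => rfl
  | cons t rest ih =>
    obtain ⟨ba, ra, bn, rn, acc⟩ := s
    simp only [List.cons_append, etc1Loop]
    split_ifs <;> apply ih

lemma etc1Loop_len (W : Int) (l : List Int) (s : Int × Int × Int × Int × List Int) :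
    ((etc1Loop W l s).2.2.2.2).length = s.2.2.2.2.length + l.length := by
  induction l generalizing s with
  | nil => simp [etc1Loop]
  | cons t rest ih =>
    obtain ⟨ba, ra, bn, rn, acc⟩ := s
    simp only [etc1Loop]
    split_ifs <;> rw [ih] <;> simp <;> omega

lemma pvOff_step (t0 i : Nat) :
    (if t0 % 2 = 0 then (1 : Int) else 3) + pvOff (t0 + 1) i = pvOff t0 (i + 1) := by
  unfold pvOff
  rcases Nat.even_or_odd t0 with h | h <;> rcases Nat.even_or_odd i with h2 | h2 <;>
    simp [Nat.even_iff, Nat.odd_iff] at h h2 <;> push_cast <;> omega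

lemma pvGlue (t0 j : Nat) (b : Int) :
    b :: (List.range j).map (fun i => (b + (if t0 % 2 = 0 then (1 : Int) else 3)) + pvOff (t0 + 1) i)
      = (List.range (j + 1)).map (fun i => b + pvOff t0 i) := by
  rw [List.range_succ_eq_map, List.map_cons, List.map_map]
  refine List.cons_eq_cons.mpr ⟨by simp [pvOff], ?_⟩
  apply List.map_congr_left
  intro i _
  show (b + (if t0 % 2 = 0 then (1 : Int) else 3)) + pvOff (t0 + 1) i = b + pvOff t0 (i.succ)
  rw [Nat.succ_eq_add_one, ← pvOff_step t0 i]
  ring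

-- fill of j consecutive non-boundary tiles starting at t0
lemma etc1_fill (Wn : Nat) (j t0 : Nat) (b ra rn : Int) (acc : List Int)
    (hnb : ∀ i : Nat, i < j → ¬ (PySem.Int.mod ((t0 + i : Nat) : Int) (Wn : Int) = 0 ∧ (0 : Int) < ((t0 + i : Nat) : Int))) :
    etc1Loop (Wn : Int) ((List.range j).map (fun i => ((t0 + i : Nat) : Int))) (((t0 % 2 : Nat) : Int), ra, b, rn, acc)
      = (((((t0 + j) % 2 : Nat)) : Int), ra, b + pvOff t0 j, rn,
          acc ++ (List.range j).map (fun i => b + pvOff t0 i)) := by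
  induction j generalizing t0 b acc with
  | zero => simp [etc1Loop, pvOff]
  | succ j ih =>
    rw [List.range_succ_eq_map, List.map_cons, List.map_map]
    have hfirst := hnb 0 (Nat.succ_pos j)
    simp only [Nat.add_zero] at hfirst
    have hmapeq : (List.range j).map ((fun i => ((t0 + i : Nat) : Int)) ∘ Nat.succ)
        = (List.range j).map (fun i => (((t0 + 1) + i : Nat) : Int)) := by
      apply List.map_congr_left; intro i _
      simp only [Function.comp]; congr 1; omega
    rw [hmapeq]
    simp only [etc1Loop]
    rw [if_neg (hnb 0 (Nat.succ_pos j))]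
    dsimp only
    have hnb' : ∀ i : Nat, i < j →
        ¬ (PySem.Int.mod (((t0 + 1) + i : Nat) : Int) (Wn : Int) = 0 ∧ (0 : Int) < (((t0 + 1) + i : Nat) : Int)) := by
      intro i hi
      have h := hnb (i + 1) (by omega)
      have he : t0 + (i + 1) = (t0 + 1) + i := by omega
      rwa [he] at h
    rcases Nat.mod_two_eq_zero_or_one t0 with h0 | h0
    · have hlt : ((t0 % 2 : Nat) : Int) < 1 := by rw [h0]; norm_num
      rw [if_pos hlt]
      have hone : ((t0 % 2 : Nat) : Int) + 1 = (((t0 + 1) % 2 : Nat) : Int) := by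
        rw [h0]; norm_num; omega
      rw [hone, ih (t0 + 1) (b + 1) (acc ++ [b]) hnb']
      have hstep := pvOff_step t0 j
      rw [if_pos h0] at hstep
      have hg := pvGlue t0 j b
      rw [if_pos h0] at hg
      refine congrArg₂ _ (by congr 1; omega) (congrArg₂ _ rfl (congrArg₂ _ (by omega) (congrArg₂ _ rfl ?_)))
      rw [List.append_assoc, List.singleton_append, hg, ← List.range_succ_eq_map]
    · have hlt : ¬ ((t0 % 2 : Nat) : Int) < 1 := by rw [h0]; norm_num
      rw [if_neg hlt]
      have hzero : etc1Loop (Wn : Int) ((List.range j).map (fun i => (((t0 + 1) + i : Nat) : Int))) (0, ra, b + 3, rn, acc ++ [b]) = etc1Loop (Wn : Int) ((List.range j).map (fun i => (((t0 + 1) + i : Nat) : Int))) ((((t0 + 1) % 2 : Nat) : Int), ra, b + 3, rn, acc ++ [b]) := by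
        congr 1
        have : (t0 + 1) % 2 = 0 := by omega
        rw [this]; norm_num
      rw [hzero, ih (t0 + 1) (b + 3) (acc ++ [b]) hnb']
      have hstep := pvOff_step t0 j
      rw [if_neg (by omega : ¬ t0 % 2 = 0)] at hstep
      have hg := pvGlue t0 j b
      rw [if_neg (by omega : ¬ t0 % 2 = 0)] at hg
      refine congrArg₂ _ (by congr 1; omega) (congrArg₂ _ rfl (congrArg₂ _ (by omega) (congrArg₂ _ rfl ?_)))
      rw [List.append_assoc, List.singleton_append, hg, ← List.range_succ_eq_map]

-- shared tail: one assign+increment step at tile t0 followed by j non-boundary fills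
lemma etc1_fill_head (Wn : Nat) (j t0 : Nat) (b ra rn : Int) (acc : List Int)
    (hnb : ∀ i : Nat, i < j → ¬ (PySem.Int.mod (((t0 + 1) + i : Nat) : Int) (Wn : Int) = 0 ∧ (0 : Int) < (((t0 + 1) + i : Nat) : Int))) :
    (if ((t0 % 2 : Nat) : Int) < 1 then
        etc1Loop (Wn : Int) ((List.range j).map (fun i => (((t0 + 1) + i : Nat) : Int))) (((t0 % 2 : Nat) : Int) + 1, ra, b + 1, rn, acc ++ [b])
      else
        etc1Loop (Wn : Int) ((List.range j).map (fun i => (((t0 + 1) + i : Nat) : Int))) (0, ra, b + 3, rn, acc ++ [b]))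
      = (((((t0 + (j + 1)) % 2 : Nat)) : Int), ra, b + pvOff t0 (j + 1), rn,
          acc ++ (List.range (j + 1)).map (fun i => b + pvOff t0 i)) := by
  rcases Nat.mod_two_eq_zero_or_one t0 with h0 | h0
  · have hlt : ((t0 % 2 : Nat) : Int) < 1 := by rw [h0]; norm_num
    rw [if_pos hlt]
    have hone : ((t0 % 2 : Nat) : Int) + 1 = (((t0 + 1) % 2 : Nat) : Int) := by
      rw [h0]; norm_num; omega
    rw [hone, etc1_fill Wn j (t0 + 1) (b + 1) ra rn (acc ++ [b]) hnb]
    have hstep := pvOff_step t0 j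
    rw [if_pos h0] at hstep
    have hg := pvGlue t0 j b
    rw [if_pos h0] at hg
    refine congrArg₂ _ (by congr 1; omega) (congrArg₂ _ rfl (congrArg₂ _ (by omega) (congrArg₂ _ rfl ?_)))
    rw [List.append_assoc, List.singleton_append, hg]
  · have hlt : ¬ ((t0 % 2 : Nat) : Int) < 1 := by rw [h0]; norm_num
    rw [if_neg hlt]
    have hzero : etc1Loop (Wn : Int) ((List.range j).map (fun i => (((t0 + 1) + i : Nat) : Int))) (0, ra, b + 3, rn, acc ++ [b]) = etc1Loop (Wn : Int) ((List.range j).map (fun i => (((t0 + 1) + i : Nat) : Int))) ((((t0 + 1) % 2 : Nat) : Int), ra, b + 3, rn, acc ++ [b]) := by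
      congr 1
      have : (t0 + 1) % 2 = 0 := by omega
      rw [this]; norm_num
    rw [hzero, etc1_fill Wn j (t0 + 1) (b + 3) ra rn (acc ++ [b]) hnb]
    have hstep := pvOff_step t0 j
    rw [if_neg (by omega : ¬ t0 % 2 = 0)] at hstep
    have hg := pvGlue t0 j b
    rw [if_neg (by omega : ¬ t0 % 2 = 0)] at hg
    refine congrArg₂ _ (by congr 1; omega) (congrArg₂ _ rfl (congrArg₂ _ (by omega) (congrArg₂ _ rfl ?_)))
    rw [List.append_assoc, List.singleton_append, hg]

lemma pvOut_succ (Wn r : Nat) :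
    pvOut Wn (r + 1) = pvOut Wn r ++ (List.range Wn).map (fun j => pvBase Wn r + pvOff (r * Wn) j) := by
  simp [pvOut, List.range_succ]

lemma pvOff_row_end (Wn s : Nat) (hs : s % 2 = 1) :
    pvOff (s * Wn) Wn = 2 * (Wn : Int) + ((Wn % 2 : Nat) : Int) := by
  unfold pvOff
  rcases Nat.mod_two_eq_zero_or_one Wn with h | h <;>
    · rw [Nat.mul_mod, hs, h]
      norm_num

lemma hnb_row0 (Wn : Nat) :
    ∀ i : Nat, i < Wn → ¬ (PySem.Int.mod ((0 * Wn + i : Nat) : Int) (Wn : Int) = 0 ∧ (0 : Int) < ((0 * Wn + i : Nat) : Int)) := by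
  intro i hi hc
  obtain ⟨hm, hp⟩ := hc
  rw [PySem.Int.mod_natCast] at hm
  have h2 : (0 * Wn + i) % Wn = 0 := by exact_mod_cast hm
  rw [Nat.zero_mul, Nat.zero_add, Nat.mod_eq_of_lt hi] at h2
  subst h2
  simp at hp

lemma hnb_interior (Wn j t0 : Nat) (hj : j < Wn) (hd : Wn ∣ t0) :
    ∀ i : Nat, i < j → ¬ (PySem.Int.mod (((t0 + 1) + i : Nat) : Int) (Wn : Int) = 0 ∧ (0 : Int) < (((t0 + 1) + i : Nat) : Int)) := by
  intro i hi hc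
  obtain ⟨hm, -⟩ := hc
  rw [PySem.Int.mod_natCast] at hm
  have h2 : (t0 + 1 + i) % Wn = 0 := by exact_mod_cast hm
  obtain ⟨q, rfl⟩ := hd
  rw [show Wn * q + 1 + i = Wn * q + (1 + i) by omega, Nat.mul_add_mod, Nat.mod_eq_of_lt (by omega)] at h2
  omega

lemma pvMap_shift (t0 : Nat) (j : Nat) :
    (List.range j).map ((fun i => ((t0 + i : Nat) : Int)) ∘ Nat.succ)
      = (List.range j).map (fun i => (((t0 + 1) + i : Nat) : Int)) := by
  apply List.map_congr_left; intro i _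
  simp only [Function.comp]; congr 1; omega

lemma etc1_rows (Wn : Nat) (hW : 1 ≤ Wn) (r : Nat) :
    etc1Loop (Wn : Int) ((List.range (r * Wn)).map (fun (i : Nat) => (i : Int))) (0, 0, 0, 0, [])
      = ((((r * Wn) % 2 : Nat) : Int),
         (if r = 0 then 0 else (((r - 1) % 2 : Nat) : Int)),
         (if r = 0 then 0 else pvBase Wn (r - 1) + pvOff ((r - 1) * Wn) Wn),
         pvBase Wn (r - 1),
         pvOut Wn r) := by
  induction r with
  | zero => simp [etc1Loop, pvOut, pvBase]
  | succ r ih =>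
    rw [show (r + 1) * Wn = r * Wn + Wn by ring, List.range_add, List.map_append, etc1Loop_append, ih]
    have hmm : (List.map (fun (i : Nat) => (i : Int)) ((List.range Wn).map (fun x => r * Wn + x)))
        = (List.range Wn).map (fun i => ((r * Wn + i : Nat) : Int)) := by
      rw [List.map_map]; rfl
    rw [hmm]
    rcases Nat.eq_zero_or_pos r with hr | hr
    · subst hr
      rw [etc1_fill Wn Wn (0 * Wn) _ _ _ _ (hnb_row0 Wn)]
      refine congrArg₂ _ (by congr 1) (congrArg₂ _ (by norm_num) (congrArg₂ _ (by simp [pvBase]) (congrArg₂ _ (by simp [pvBase]) ?_)))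
      simp [pvOut, pvBase]
    · obtain ⟨s, rfl⟩ : ∃ s, r = s + 1 := ⟨r - 1, by omega⟩
      obtain ⟨Wm, rfl⟩ : ∃ Wm, Wn = Wm + 1 := ⟨Wn - 1, by omega⟩
      have hne : ¬ (s + 1 = 0) := Nat.succ_ne_zero s
      simp only [if_neg hne, if_neg (Nat.succ_ne_zero (s + 1)), Nat.add_sub_cancel]
      rw [List.range_succ_eq_map, List.map_cons, List.map_map, pvMap_shift]
      simp only [etc1Loop, Nat.add_zero]
      have hcond : PySem.Int.mod ((((s + 1) * (Wm + 1) : Nat)) : Int) (((Wm + 1 : Nat)) : Int) = 0 ∧ (0 : Int) < (((s + 1) * (Wm + 1) : Nat) : Int) := by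
        constructor
        · rw [PySem.Int.mod_natCast, Nat.mul_mod_left]; norm_num
        · push_cast; positivity
      rw [if_pos hcond]
      have hdvd : (Wm + 1) ∣ (s + 1) * (Wm + 1) := Dvd.intro_left _ rfl
      have hWm : Wm < Wm + 1 := Nat.lt_succ_self Wm
      rcases Nat.mod_two_eq_zero_or_one s with hs | hs
      · -- s even, row index s+1 odd: rowAccumulator branch +2
        have h2 : (s + 1) % 2 = 1 := by omega
        rw [if_pos (show ((s % 2 : Nat) : Int) < 1 by simp [hs])]
        dsimp only
        rw [etc1_fill_head (Wm + 1) Wm ((s + 1) * (Wm + 1)) _ _ _ _ (hnb_interior (Wm + 1) Wm _ hWm hdvd)]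
        have hbase : pvBase (Wm + 1) s + 2 = pvBase (Wm + 1) (s + 1) := by
          simp [pvBase, h2]
        refine congrArg₂ _ rfl (congrArg₂ _ (by rw [h2, hs]; norm_num) (congrArg₂ _ (by rw [hbase]) (congrArg₂ _ (by rw [hbase]) ?_)))
        conv_rhs => rw [pvOut_succ]
        rw [hbase]
      · -- s odd, row index s+1 even: rowAccumulator reset branch -2
        have h2 : (s + 1) % 2 = 0 := by omega
        rw [if_neg (show ¬ ((s % 2 : Nat) : Int) < 1 by simp [hs])]
        dsimp only
        rw [etc1_fill_head (Wm + 1) Wm ((s + 1) * (Wm + 1)) _ _ _ _ (hnb_interior (Wm + 1) Wm _ hWm hdvd)]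
        have hbase : pvBase (Wm + 1) s + pvOff (s * (Wm + 1)) (Wm + 1) - 2 = pvBase (Wm + 1) (s + 1) := by
          rw [pvOff_row_end (Wm + 1) s hs]
          simp [pvBase, h2]
          ring
        refine congrArg₂ _ rfl (congrArg₂ _ (by rw [h2]; norm_num) (congrArg₂ _ (by rw [hbase]) (congrArg₂ _ (by rw [hbase]) ?_)))
        conv_rhs => rw [pvOut_succ]
        rw [hbase]

lemma pvModCast (n : Nat) : PySem.Int.mod ((n : Nat) : Int) 2 = ((n % 2 : Nat) : Int) := by
  rw [PySem.Int.mod_eq_emod_of_pos (by norm_num)]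
  push_cast
  rfl

lemma pvRowMap (Wn r : Nat) (base : Int) :
    (List.range Wn).map (fun (j : Nat) =>
        if r % 2 = 1 ∧ PySem.Int.mod ((Wn : Nat) : Int) 2 = 1 then base + 2 * (j : Int) + PySem.Int.mod (j : Int) 2
        else base + 2 * (j : Int) - PySem.Int.mod (j : Int) 2)
      = (List.range Wn).map (fun j => base + pvOff (r * Wn) j) := by
  apply List.map_congr_left; intro j _
  rw [pvModCast Wn, pvModCast j]
  by_cases hc : r % 2 = 1 ∧ Wn % 2 = 1
  · have hm : (r * Wn) % 2 = 1 := by rw [Nat.mul_mod, hc.1, hc.2]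
    rw [if_pos (by exact ⟨hc.1, by rw [hc.2]; norm_num⟩)]
    unfold pvOff
    rw [if_neg (by omega)]
    ring
  · have hm : (r * Wn) % 2 = 0 := by
      rw [Nat.mul_mod]
      rcases Nat.mod_two_eq_zero_or_one r with h | h <;>
        rcases Nat.mod_two_eq_zero_or_one Wn with h' | h'
      · rw [h, h']
      · rw [h, h']
      · rw [h, h']
      · exact absurd ⟨h, h'⟩ hc
    rw [if_neg (by
      intro hcc
      exact hc ⟨hcc.1, by have := hcc.2; omega⟩)]
    unfold pvOff
    rw [if_pos hm]
    ring

lemma etc1_alt_fold (Wn : Nat) (r : Nat) :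
    ((List.range r).foldl
      (fun (st : Int × List Int) (k : Nat) =>
        let base :=
          if 0 < k then
            (if k % 2 = 1 then st.1 + 2 else st.1 + 2 * ((Wn : Nat) : Int) + PySem.Int.mod ((Wn : Nat) : Int) 2 - 2)
          else st.1
        let row := ((List.range Wn).map (fun (j : Nat) =>
          if k % 2 = 1 ∧ PySem.Int.mod ((Wn : Nat) : Int) 2 = 1 then base + 2 * (j : Int) + PySem.Int.mod (j : Int) 2
          else base + 2 * (j : Int) - PySem.Int.mod (j : Int) 2))
        (base, st.2 ++ row))
      ((0 : Int), ([] : List Int)))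
      = (pvBase Wn (r - 1), pvOut Wn r) := by
  induction r with
  | zero => simp [pvOut, pvBase]
  | succ r ih =>
    rw [List.range_succ, List.foldl_append, ih]
    simp only [List.foldl_cons, List.foldl_nil]
    have hbase : (if 0 < r then
        (if r % 2 = 1 then pvBase Wn (r - 1) + 2 else pvBase Wn (r - 1) + 2 * ((Wn : Nat) : Int) + PySem.Int.mod ((Wn : Nat) : Int) 2 - 2)
      else pvBase Wn (r - 1)) = pvBase Wn r := by
      rcases Nat.eq_zero_or_pos r with hr | hr
      · subst hr; simp
      · obtain ⟨s, rfl⟩ : ∃ s, r = s + 1 := ⟨r - 1, by omega⟩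
        rw [if_pos (by omega), Nat.add_sub_cancel, pvModCast Wn]
        simp [pvBase]
    rw [hbase, pvRowMap Wn r (pvBase Wn r), Nat.add_sub_cancel]
    rw [pvOut_succ]

-- ===== VERDICT (by name: the statement is the Claim_ definition above) =====
theorem etc1Scramble_spec : Claim_unchanged_etc1Scramble := by
  intro width height hdom
  unfold Spec_etc1Scramble
  intro hnd
  unfold D_etc1Scramble at hnd
  have hWd : PySem.Int.floordiv width 4 = width / 4 := PySem.Int.floordiv_eq_ediv_of_pos (by norm_num)
  have hHd : PySem.Int.floordiv height 4 = height / 4 := PySem.Int.floordiv_eq_ediv_of_pos (by norm_num)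
  by_cases hpos : 0 < width / 4 ∧ 0 < height / 4
  · obtain ⟨hpw, hph⟩ := hpos
    have hcW : PySem.Int.floordiv width 4 = (((width / 4).toNat : Nat) : Int) := by
      rw [hWd, Int.toNat_of_nonneg (by omega)]
    have hcH : PySem.Int.floordiv height 4 = (((height / 4).toNat : Nat) : Int) := by
      rw [hHd, Int.toNat_of_nonneg (by omega)]
    set Wn := (width / 4).toNat with hWn
    set Hn := (height / 4).toNat with hHn
    have hWn1 : 1 ≤ Wn := by omega
    have hHn1 : 1 ≤ Hn := by omega
    simp only [etc1Scramble, etc1Scramble_alt, hcW, hcH]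
    rw [if_neg (by omega)]
    rw [Int.toNat_natCast, Int.toNat_natCast]
    rw [etc1_alt_fold Wn Hn]
    have hn : ((Wn : Nat) : Int) * ((Hn : Nat) : Int) = ((Wn * Hn : Nat) : Int) := by push_cast; ring
    rw [hn, PySem.List.pyRange_one]
    rw [show (((Wn * Hn : Nat) : Int) - 0) = ((Wn * Hn : Nat) : Int) by ring,
        Int.toNat_natCast, Nat.mul_comm Wn Hn]
    have hmap : (List.range (Hn * Wn)).map (fun (k : Nat) => (0 : Int) + (k : Int))
        = (List.range (Hn * Wn)).map (fun (i : Nat) => (i : Int)) := by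
      apply List.map_congr_left; intro i _; ring
    rw [hmap, etc1_rows Wn hWn1 Hn]
  · simp only [etc1Scramble, etc1Scramble_alt]
    rw [if_pos (by rw [hWd, hHd]; omega)]
    have hn : PySem.Int.floordiv width 4 * PySem.Int.floordiv height 4 ≤ 0 := by
      rw [hWd, hHd]
      apply mul_nonpos_iff.mpr
      omega
    rw [PySem.List.pyRange_one_eq_nil hn]
    rfl

theorem etc1Scramble_changed : Claim_changed_etc1Scramble := by
  unfold Claim_changed_etc1Scramble; decide

theorem etc1Scramble_tight : Claim_exact_etc1Scramble := by
  intro width height hdom hd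
  obtain ⟨hw, hh⟩ := hd
  have hWd : PySem.Int.floordiv width 4 = width / 4 := PySem.Int.floordiv_eq_ediv_of_pos (by norm_num)
  have hHd : PySem.Int.floordiv height 4 = height / 4 := PySem.Int.floordiv_eq_ediv_of_pos (by norm_num)
  have hB : etc1Scramble_alt width height = [] := by
    simp only [etc1Scramble_alt]
    rw [if_pos (Or.inl (by rw [hWd]; omega))]
  intro heq
  have hlen := congrArg List.length heq
  rw [hB] at hlen
  simp only [etc1Scramble] at hlen
  rw [etc1Loop_len, PySem.List.length_pyRange_one, hWd, hHd] at hlen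
  have hprod : 0 < (width / 4) * (height / 4) :=
    mul_pos_of_neg_of_neg (by omega) (by omega)
  set P : Int := (width / 4) * (height / 4) with hP
  simp only [List.length_nil] at hlen
  omega
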